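-- pv_equiv track=rewrite | github.com/SemiSimpleMath/wordle | utils.py | create_doesnt_contain_dicts
-- ===== SOURCE A (Python) =====
-- def create_doesnt_contain_dicts(final):
--
--     d = [set() for i in range(0, 26)]
--
--     for i, word in enumerate(final):
--         for j in range(0, 26):
--             n = j + ord('a')
--
--             if chr(n) not in word:
--                 d[j].add(word)
--
--     return d
-- ===== SOURCE B (Python) =====
-- def create_doesnt_contain_dicts(final):
--     # Complement pass: start every letter's set full, then remove each word
--     # from the sets of the lowercase letters it actually contains.
--     d = [set(final) for _ in range(26)]
--     for word in final:
--         for ch in set(word):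
--             if 'a' <= ch <= 'z':
--                 d[ord(ch) - ord('a')].discard(word)
--     return d
-- ===== Notes on version B (the rewrite author's own statement) =====
-- stated objective: alternative
-- what changed: Replaces A's per-word scan over all 26 letters with membership tests by a complement pass: every letter's set starts as set(final) and each word is removed from the sets of the distinct lowercase letters it contains.
import Mathlib
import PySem

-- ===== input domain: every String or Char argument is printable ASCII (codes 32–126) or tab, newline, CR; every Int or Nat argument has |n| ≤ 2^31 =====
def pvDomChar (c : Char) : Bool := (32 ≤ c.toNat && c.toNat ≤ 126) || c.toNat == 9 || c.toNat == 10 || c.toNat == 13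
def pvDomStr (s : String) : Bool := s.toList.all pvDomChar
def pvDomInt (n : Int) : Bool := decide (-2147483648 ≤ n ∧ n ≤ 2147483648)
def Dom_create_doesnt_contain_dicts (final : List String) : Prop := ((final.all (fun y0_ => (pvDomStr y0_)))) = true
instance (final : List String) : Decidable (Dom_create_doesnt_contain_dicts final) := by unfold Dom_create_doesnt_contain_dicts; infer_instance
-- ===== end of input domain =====

-- B replaces A's per-word scan over all 26 letters by a complement pass: each
-- letter's set starts as set(final) and each word is removed from the sets of
-- the distinct lowercase letters it contains.

-- ===== PORT A =====
def create_doesnt_contain_dicts (final : List String) : List (List String) :=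
  -- d = [set() for i in range(0, 26)]
  let d : List (List String) := (PySem.List.pyRange 0 26 1).map (fun _ => (PySem.Set.empty : PySem.Set String))
  -- for i, word in enumerate(final): for j in range(0, 26): n = j + ord('a'); if chr(n) not in word: d[j].add(word)
  (PySem.List.enumerate final).foldl (fun d iw =>
    (PySem.List.pyRange 0 26 1).foldl (fun d j =>
      let n : Int := j + 97  -- ord('a') = 97
      -- 'chr(n) not in word' is a 1-character substring test
      if ¬ (PySem.Str.isIn (String.ofList [Char.ofNat n.toNat]) iw.2 = true) then
        PySem.List.pySetD d j (PySem.Set.add (PySem.List.pyGetD d j []) iw.2)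
      else d) d) d

-- ===== PORT B =====
def create_doesnt_contain_dicts_alt (final : List String) : List (List String) :=
  -- d = [set(final) for _ in range(26)]
  let d : List (List String) := (PySem.List.pyRange 0 26 1).map (fun _ => PySem.Set.ofList final)
  -- for word in final: for ch in set(word): if 'a' <= ch <= 'z': d[ord(ch) - ord('a')].discard(word)
  -- (the removals hit pairwise distinct indices, so the set-iteration order cannot matter)
  final.foldl (fun d word =>
    (PySem.Set.ofList word.toList).foldl (fun d ch =>
      if 'a' ≤ ch ∧ ch ≤ 'z' then
        let i : Int := (ch.toNat : Int) - 97
        PySem.List.pySetD d i (PySem.Set.discard (PySem.List.pyGetD d i []) word)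
      else d) d) d

-- ===== PRECONDITION & SPEC =====
def Spec_create_doesnt_contain_dicts (final : List String) (out : List (List String)) : Prop := out = create_doesnt_contain_dicts_alt final
instance (final : List String) (out : List (List String)) : Decidable (Spec_create_doesnt_contain_dicts final out) := by unfold Spec_create_doesnt_contain_dicts; infer_instance

-- ===== CLAIM (what is proved, stated in full; the proofs are below) =====
def Claim_equal_create_doesnt_contain_dicts : Prop := ∀ (final : List String), Dom_create_doesnt_contain_dicts final → Spec_create_doesnt_contain_dicts final (create_doesnt_contain_dicts final)

-- ===== LEMMAS AND PROOFS =====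

-- the letter with index k
def pvLetter (k : Nat) : Char := Char.ofNat (97 + k)

-- the loop bodies of the two inner loops, as they appear in the ports
def pvStepA (w : String) : List (List String) → Int → List (List String) := fun d j =>
  let n : Int := j + 97
  if ¬ (PySem.Str.isIn (String.ofList [Char.ofNat n.toNat]) w = true) then
    PySem.List.pySetD d j (PySem.Set.add (PySem.List.pyGetD d j []) w)
  else d

def pvStepB (w : String) : List (List String) → Char → List (List String) := fun d ch =>
  if 'a' ≤ ch ∧ ch ≤ 'z' then
    let i : Int := (ch.toNat : Int) - 97
    PySem.List.pySetD d i (PySem.Set.discard (PySem.List.pyGetD d i []) w)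
  else d

theorem pvA_unfold (final : List String) :
    create_doesnt_contain_dicts final =
      (PySem.List.enumerate final).foldl (fun d iw =>
        (PySem.List.pyRange 0 26 1).foldl (pvStepA iw.2) d) (List.replicate 26 []) := by
  have h0 : (PySem.List.pyRange 0 26 1).map (fun _ => (PySem.Set.empty : PySem.Set String)) = List.replicate 26 [] := by decide
  unfold create_doesnt_contain_dicts
  dsimp only
  rw [h0]
  rfl

theorem pvB_unfold (final : List String) :
    create_doesnt_contain_dicts_alt final =
      final.foldl (fun d word =>
        (PySem.Set.ofList word.toList).foldl (pvStepB word) d)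
        (List.replicate 26 (PySem.Set.ofList final)) := by
  have h0 : (PySem.List.pyRange 0 26 1).map (fun _ => PySem.Set.ofList final) = List.replicate 26 (PySem.Set.ofList final) := by
    have : PySem.List.pyRange 0 26 1 = [0,1,2,3,4,5,6,7,8,9,10,11,12,13,14,15,16,17,18,19,20,21,22,23,24,25] := by decide
    rw [this]; rfl
  unfold create_doesnt_contain_dicts_alt
  dsimp only
  rw [h0]
  rfl

theorem pvChar_toNat_inj {c d : Char} (h : c.toNat = d.toNat) : c = d :=
  Char.ext (UInt32.toNat_inj.mp h)

theorem pvChar_le_iff {c d : Char} : c ≤ d ↔ c.toNat ≤ d.toNat := Iff.rfl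

theorem pvLetter_toNat {k : Nat} (hk : k < 26) : (pvLetter k).toNat = 97 + k := by
  interval_cases k <;> rfl

theorem pvLetter_lower {k : Nat} (hk : k < 26) : 'a' ≤ pvLetter k ∧ pvLetter k ≤ 'z' := by
  interval_cases k <;> exact ⟨by decide, by decide⟩

theorem pvGetD_set (l : List (List String)) (i k : Nat) (v : List String) :
    (l.set i v).getD k [] = if i = k ∧ i < l.length then v else l.getD k [] := by
  simp only [List.getD_eq_getElem?_getD, List.getElem?_set]
  by_cases h1 : i = k <;> by_cases h2 : i < l.length
  · simp_all
  · simp_all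
    split <;> simp_all
  · simp_all
  · simp_all

-- one generic lemma for both inner loops: a fold of guarded point updates at
-- indices that are pairwise distinct among the guarded elements
theorem pvFoldSet {β : Type} (idx : β → Nat) (g : β → Prop) [DecidablePred g]
    (E : List String → List String) :
    ∀ (xs : List β) (d : List (List String)), xs.Nodup →
      (∀ a b, a ∈ xs → b ∈ xs → g a → g b → idx a = idx b → a = b) →
      (∀ a ∈ xs, g a → idx a < d.length) →
      ((xs.foldl (fun d a => if g a then d.set (idx a) (E (d.getD (idx a) [])) else d) d).length = d.length ∧
       ∀ k, (xs.foldl (fun d a => if g a then d.set (idx a) (E (d.getD (idx a) [])) else d) d).getD k [] =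
         if (∃ a ∈ xs, g a ∧ idx a = k) then E (d.getD k []) else d.getD k []) := by
  intro xs
  induction xs with
  | nil => intro d _ _ _; simp
  | cons a xs ih =>
    intro d hnd hinj hb
    have hnd' : xs.Nodup := hnd.of_cons
    have hna : a ∉ xs := (List.nodup_cons.mp hnd).1
    have hinj' : ∀ a' b', a' ∈ xs → b' ∈ xs → g a' → g b' → idx a' = idx b' → a' = b' :=
      fun a' b' h1 h2 => hinj a' b' (List.mem_cons_of_mem a h1) (List.mem_cons_of_mem a h2)
    by_cases hga : g a
    · have hia : idx a < d.length := hb a (List.mem_cons_self) hga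
      set d' := d.set (idx a) (E (d.getD (idx a) [])) with hd'
      have hlen' : d'.length = d.length := by simp [hd']
      have hb' : ∀ b ∈ xs, g b → idx b < d'.length := by
        intro b hbmem hgb; rw [hlen']; exact hb b (List.mem_cons_of_mem a hbmem) hgb
      obtain ⟨ihl, ihk⟩ := ih d' hnd' hinj' hb'
      constructor
      · simp only [List.foldl_cons, if_pos hga, ← hd', ihl, hlen']
      · intro k
        simp only [List.foldl_cons, if_pos hga, ← hd', ihk k]
        rw [pvGetD_set]
        by_cases hex : ∃ b ∈ xs, g b ∧ idx b = k
        · obtain ⟨b, hbm, hgb, hbk⟩ := hex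
          have hne : ¬ (idx a = k ∧ idx a < d.length) := by
            rintro ⟨hak, -⟩
            exact hna ((hinj a b (List.mem_cons_self) (List.mem_cons_of_mem a hbm) hga hgb
              (hak.trans hbk.symm)) ▸ hbm)
          rw [if_pos ⟨b, hbm, hgb, hbk⟩, if_neg hne,
            if_pos (⟨b, List.mem_cons_of_mem a hbm, hgb, hbk⟩ : ∃ c ∈ a :: xs, g c ∧ idx c = k)]
        · rw [if_neg hex]
          by_cases hak : idx a = k
          · rw [if_pos ⟨hak, hia⟩, if_pos ⟨a, List.mem_cons_self, hga, hak⟩, hak]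
          · rw [if_neg (by tauto)]
            have hnone : ¬ ∃ c ∈ a :: xs, g c ∧ idx c = k := by
              rintro ⟨c, hcm, hgc, hck⟩
              rcases List.mem_cons.mp hcm with rfl | hcm'
              · exact hak hck
              · exact hex ⟨c, hcm', hgc, hck⟩
            rw [if_neg hnone]
    · simp only [List.foldl_cons, if_neg hga]
      obtain ⟨ihl, ihk⟩ := ih d hnd' hinj' (fun b hbm => hb b (List.mem_cons_of_mem a hbm))
      refine ⟨ihl, fun k => ?_⟩
      rw [ihk k]
      have hiff : (∃ c ∈ a :: xs, g c ∧ idx c = k) ↔ (∃ c ∈ xs, g c ∧ idx c = k) := by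
        constructor
        · rintro ⟨c, hcm, hgc, hck⟩
          rcases List.mem_cons.mp hcm with rfl | h'
          · exact absurd hgc hga
          · exact ⟨c, h', hgc, hck⟩
        · rintro ⟨c, hcm, hgc, hck⟩; exact ⟨c, List.mem_cons_of_mem a hcm, hgc, hck⟩
      by_cases hex : ∃ c ∈ xs, g c ∧ idx c = k
      · rw [if_pos hex, if_pos (hiff.mpr hex)]
      · rw [if_neg hex, if_neg (fun h => hex (hiff.mp h))]

-- A's inner loop, characterised per index
theorem pvInnerA (w : String) (d : List (List String)) (hd : d.length = 26) :
    (((PySem.List.pyRange 0 26 1).foldl (pvStepA w) d).length = 26 ∧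
     ∀ k, k < 26 →
      ((PySem.List.pyRange 0 26 1).foldl (pvStepA w) d).getD k [] =
        if ¬ (PySem.Str.isIn (String.ofList [pvLetter k]) w = true) then
          PySem.Set.add (d.getD k []) w
        else d.getD k []) := by
  have hcong : (PySem.List.pyRange 0 26 1).foldl (pvStepA w) d =
      (PySem.List.pyRange 0 26 1).foldl (fun d j =>
        if ¬ (PySem.Str.isIn (String.ofList [Char.ofNat (j + 97).toNat]) w = true) then
          d.set j.toNat (PySem.Set.add (d.getD j.toNat []) w)
        else d) d := by
    apply PySem.List.foldl_congr_mem
    intro acc j hj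
    have h0 : (0 : Int) ≤ j := (PySem.List.mem_pyRange_one.mp hj).1
    unfold pvStepA
    dsimp only
    split_ifs with h
    · rfl
    · rw [PySem.List.pySetD_of_nonneg _ _ h0, PySem.List.pyGetD_of_nonneg _ _ h0]
  rw [hcong]
  obtain ⟨hl, hk⟩ := pvFoldSet (fun j : Int => j.toNat)
      (fun j => ¬ (PySem.Str.isIn (String.ofList [Char.ofNat (j + 97).toNat]) w = true))
      (fun s => PySem.Set.add s w)
      (PySem.List.pyRange 0 26 1) d (by decide)
      (by
        intro a b ha hb _ _ hab
        dsimp only at hab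
        have h1 := PySem.List.mem_pyRange_one.mp ha
        have h2 := PySem.List.mem_pyRange_one.mp hb
        omega)
      (by
        intro a ha _
        dsimp only
        have h1 := PySem.List.mem_pyRange_one.mp ha
        rw [hd]
        omega)
  refine ⟨by rw [hl, hd], fun k hk26 => ?_⟩
  rw [hk k]
  have hC : Char.ofNat (((k : Nat) : Int) + 97).toNat = pvLetter k := by
    have : (((k : Nat) : Int) + 97).toNat = 97 + k := by omega
    rw [this]; rfl
  have hiff : (∃ a ∈ PySem.List.pyRange 0 26 1,
      ¬ (PySem.Str.isIn (String.ofList [Char.ofNat (a + 97).toNat]) w = true) ∧ a.toNat = k) ↔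
      ¬ (PySem.Str.isIn (String.ofList [pvLetter k]) w = true) := by
    constructor
    · rintro ⟨a, ham, hga, hak⟩
      have h1 := PySem.List.mem_pyRange_one.mp ham
      have : a = ((k : Nat) : Int) := by omega
      subst this
      rwa [hC] at hga
    · intro h
      refine ⟨((k : Nat) : Int), PySem.List.mem_pyRange_one.mpr (by omega), ?_, by omega⟩
      rwa [hC]
  rw [if_congr hiff rfl rfl]

-- B's inner loop, characterised per index
theorem pvInnerB (w : String) (d : List (List String)) (hd : d.length = 26) :
    (((PySem.Set.ofList w.toList).foldl (pvStepB w) d).length = 26 ∧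
     ∀ k, k < 26 →
      ((PySem.Set.ofList w.toList).foldl (pvStepB w) d).getD k [] =
        if pvLetter k ∈ w.toList then PySem.Set.discard (d.getD k []) w else d.getD k []) := by
  have hcong : (PySem.Set.ofList w.toList).foldl (pvStepB w) d =
      (PySem.Set.ofList w.toList).foldl (fun d ch =>
        if 'a' ≤ ch ∧ ch ≤ 'z' then
          d.set (ch.toNat - 97) (PySem.Set.discard (d.getD (ch.toNat - 97) []) w)
        else d) d := by
    apply PySem.List.foldl_congr_mem
    intro acc ch _
    unfold pvStepB
    dsimp only
    split_ifs with h
    · have h97 : 97 ≤ ch.toNat := pvChar_le_iff.mp h.1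
      have h0 : (0 : Int) ≤ (ch.toNat : Int) - 97 := by omega
      rw [PySem.List.pySetD_of_nonneg _ _ h0, PySem.List.pyGetD_of_nonneg _ _ h0]
      have : ((ch.toNat : Int) - 97).toNat = ch.toNat - 97 := by omega
      rw [this]
    · rfl
  rw [hcong]
  obtain ⟨hl, hk⟩ := pvFoldSet (fun ch : Char => ch.toNat - 97)
      (fun ch => 'a' ≤ ch ∧ ch ≤ 'z')
      (fun s => PySem.Set.discard s w)
      (PySem.Set.ofList w.toList) d (PySem.Set.nodup_ofList w.toList)
      (by
        intro a b _ _ hga hgb hab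
        dsimp only at hab
        have h1 : 97 ≤ a.toNat := pvChar_le_iff.mp hga.1
        have h2 : 97 ≤ b.toNat := pvChar_le_iff.mp hgb.1
        exact pvChar_toNat_inj (by omega))
      (by
        intro a _ hga
        dsimp only
        have h1 : 97 ≤ a.toNat := pvChar_le_iff.mp hga.1
        have h2 : a.toNat ≤ 122 := pvChar_le_iff.mp hga.2
        rw [hd]
        omega)
  refine ⟨by rw [hl, hd], fun k hk26 => ?_⟩
  rw [hk k]
  have hiff : (∃ ch ∈ PySem.Set.ofList w.toList, ('a' ≤ ch ∧ ch ≤ 'z') ∧ ch.toNat - 97 = k) ↔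
      pvLetter k ∈ w.toList := by
    constructor
    · rintro ⟨ch, hm, hg, hidx⟩
      have h1 : 97 ≤ ch.toNat := pvChar_le_iff.mp hg.1
      have : ch = pvLetter k := pvChar_toNat_inj (by rw [pvLetter_toNat hk26]; omega)
      subst this
      exact (PySem.Set.mem_ofList _ _).mp hm
    · intro h
      exact ⟨pvLetter k, (PySem.Set.mem_ofList _ _).mpr h, pvLetter_lower hk26,
        by rw [pvLetter_toNat hk26]; omega⟩
  by_cases h : pvLetter k ∈ w.toList
  · rw [if_pos (hiff.mpr h), if_pos h]
  · rw [if_neg (fun hc => h (hiff.mp hc)), if_neg h]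

-- outer loop of A collapses to a per-index fold over the words
theorem pvOuterA (L : List (Int × String)) :
    ∀ (d : List (List String)), d.length = 26 →
      ((L.foldl (fun d iw => (PySem.List.pyRange 0 26 1).foldl (pvStepA iw.2) d) d).length = 26 ∧
       ∀ k, k < 26 →
        (L.foldl (fun d iw => (PySem.List.pyRange 0 26 1).foldl (pvStepA iw.2) d) d).getD k [] =
          L.foldl (fun s iw =>
            if ¬ (PySem.Str.isIn (String.ofList [pvLetter k]) iw.2 = true) then
              PySem.Set.add s iw.2 else s) (d.getD k [])) := by
  induction L with
  | nil => intro d hd; exact ⟨hd, fun k hk => rfl⟩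
  | cons a L ih =>
    intro d hd
    obtain ⟨hl, hk⟩ := pvInnerA a.2 d hd
    obtain ⟨ihl, ihk⟩ := ih _ hl
    refine ⟨ihl, fun k hkk => ?_⟩
    rw [List.foldl_cons, List.foldl_cons, ihk k hkk, hk k hkk]

-- outer loop of B collapses to a per-index fold over the words
theorem pvOuterB (L : List String) :
    ∀ (d : List (List String)), d.length = 26 →
      ((L.foldl (fun d word => (PySem.Set.ofList word.toList).foldl (pvStepB word) d) d).length = 26 ∧
       ∀ k, k < 26 →
        (L.foldl (fun d word => (PySem.Set.ofList word.toList).foldl (pvStepB word) d) d).getD k [] =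
          L.foldl (fun s word =>
            if pvLetter k ∈ word.toList then PySem.Set.discard s word else s) (d.getD k [])) := by
  induction L with
  | nil => intro d hd; exact ⟨hd, fun k hk => rfl⟩
  | cons a L ih =>
    intro d hd
    obtain ⟨hl, hk⟩ := pvInnerB a d hd
    obtain ⟨ihl, ihk⟩ := ih _ hl
    refine ⟨ihl, fun k hkk => ?_⟩
    rw [List.foldl_cons, List.foldl_cons, ihk k hkk, hk k hkk]

-- a fold over enumerate that ignores the running index is a fold over the list
theorem pvEnumFold {α : Type} (h : String → α → α) :
    ∀ (xs : List String) (s0 : α) (st : Int),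
      (PySem.List.enumerate xs st).foldl (fun s iw => h iw.2 s) s0 = xs.foldl (fun s w => h w s) s0 := by
  intro xs
  induction xs with
  | nil => intro s0 st; rfl
  | cons x xs ih => intro s0 st; rw [PySem.List.enumerate_cons, List.foldl_cons, List.foldl_cons, ih]

-- the add-side fold is an ordered-distinct filter
theorem pvAddSide (p : String → Prop) [DecidablePred p] :
    ∀ (L T : List String),
      L.foldl (fun s w => if ¬ p w then PySem.Set.add s w else s)
        (T.filter (fun w => !decide (p w))) =
      (L.foldl PySem.Set.add T).filter (fun w => !decide (p w)) := by
  intro L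
  induction L with
  | nil => intro T; rfl
  | cons w L ih =>
    intro T
    rw [List.foldl_cons, List.foldl_cons]
    by_cases hp : p w
    · rw [if_neg (not_not_intro hp)]
      have hq : (PySem.Set.add T w).filter (fun w => !decide (p w)) = T.filter (fun w => !decide (p w)) := by
        rw [PySem.Set.add_eq_ite]
        split_ifs with hm
        · rfl
        · rw [List.filter_append]; simp [hp]
      rw [← ih (PySem.Set.add T w), hq]
    · by_cases hm : w ∈ T
      · have hmf : w ∈ T.filter (fun w => !decide (p w)) := List.mem_filter.mpr ⟨hm, by simp [hp]⟩
        rw [if_pos hp, PySem.Set.add_of_mem hmf, PySem.Set.add_of_mem hm]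
        exact ih T
      · have hmf : w ∉ T.filter (fun w => !decide (p w)) := fun h => hm (List.mem_filter.mp h).1
        rw [if_pos hp, PySem.Set.add_of_not_mem hmf, PySem.Set.add_of_not_mem hm]
        have : T.filter (fun w => !decide (p w)) ++ [w] = (T ++ [w]).filter (fun w => !decide (p w)) := by
          rw [List.filter_append]; simp [hp]
        rw [this]
        exact ih (T ++ [w])

-- the discard-side fold filters the accumulator
theorem pvDiscardSide (p : String → Prop) [DecidablePred p] :
    ∀ (L S : List String),
      L.foldl (fun s w => if p w then PySem.Set.discard s w else s) S =
      S.filter (fun w => !decide (p w) || !(L.contains w)) := by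
  intro L
  induction L with
  | nil => intro S; simp
  | cons w0 L ih =>
    intro S
    rw [List.foldl_cons]
    by_cases hp : p w0
    · rw [if_pos hp, ih]
      show (List.filter _ S).filter _ = _
      rw [List.filter_filter]
      apply List.filter_congr
      intro x _
      by_cases hx : x = w0
      · subst hx; simp [hp]
      · simp [hx]
    · rw [if_neg hp, ih]
      apply List.filter_congr
      intro x _
      by_cases hx : x = w0
      · subst hx; simp [hp]
      · simp [hx]

-- both per-index folds compute the same list
theorem pvPerIndex (final : List String) (k : Nat) (_hk : k < 26) :
    final.foldl (fun s w =>
        if ¬ (PySem.Str.isIn (String.ofList [pvLetter k]) w = true) then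
          PySem.Set.add s w else s) [] =
    final.foldl (fun s w =>
        if pvLetter k ∈ w.toList then PySem.Set.discard s w else s) (PySem.Set.ofList final) := by
  have hiff : ∀ w : String, (PySem.Str.isIn (String.ofList [pvLetter k]) w = true) ↔ pvLetter k ∈ w.toList := by
    intro w
    rw [PySem.Str.isIn_iff_infix, String.toList_ofList]
    exact List.singleton_infix_iff _ _
  have hA : final.foldl (fun s w =>
      if ¬ (PySem.Str.isIn (String.ofList [pvLetter k]) w = true) then
        PySem.Set.add s w else s) [] =
      final.foldl (fun s w =>
        if ¬ (pvLetter k ∈ w.toList) then PySem.Set.add s w else s) [] := by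
    apply PySem.List.foldl_congr_mem
    intro acc w _
    exact if_congr (not_congr (hiff w)) rfl rfl
  rw [hA]
  have h1 := pvAddSide (fun w => pvLetter k ∈ w.toList) final []
  have h2 := pvDiscardSide (fun w => pvLetter k ∈ w.toList) final (PySem.Set.ofList final)
  rw [show (([] : List String).filter (fun w => !decide (pvLetter k ∈ w.toList))) = ([] : List String) from rfl] at h1
  rw [h1, h2, ← PySem.Set.ofList_eq_foldl]
  apply List.filter_congr
  intro x hx
  have hcon : final.contains x = true := by
    simpa using (PySem.Set.mem_ofList _ _).mp hx
  rw [hcon]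
  simp

-- ===== VERDICT (by name: the statement is the Claim_ definition above) =====
theorem create_doesnt_contain_dicts_spec : Claim_equal_create_doesnt_contain_dicts := by
  intro final _
  unfold Spec_create_doesnt_contain_dicts
  rw [pvA_unfold, pvB_unfold]
  obtain ⟨hal, hak⟩ := pvOuterA (PySem.List.enumerate final) (List.replicate 26 []) (by simp)
  obtain ⟨hbl, hbk⟩ := pvOuterB final (List.replicate 26 (PySem.Set.ofList final)) (by simp)
  apply List.ext_getElem (hal.trans hbl.symm)
  intro k h1 h2
  rw [← List.getD_eq_getElem _ [] h1, ← List.getD_eq_getElem _ [] h2]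
  have hk : k < 26 := hal ▸ h1
  rw [hak k hk, hbk k hk]
  have e1 : (List.replicate 26 ([] : List String)).getD k [] = [] := by
    rw [List.getD_eq_getElem _ _ (by simpa using hk)]; exact List.getElem_replicate _
  have e2 : (List.replicate 26 (PySem.Set.ofList final)).getD k [] = PySem.Set.ofList final := by
    rw [List.getD_eq_getElem _ _ (by simpa using hk)]; exact List.getElem_replicate _
  rw [e1, e2]
  have : ∀ s0 : List String,
      (PySem.List.enumerate final).foldl (fun s iw =>
        if ¬ (PySem.Str.isIn (String.ofList [pvLetter k]) iw.2 = true) then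
          PySem.Set.add s iw.2 else s) s0 =
      final.foldl (fun s w =>
        if ¬ (PySem.Str.isIn (String.ofList [pvLetter k]) w = true) then
          PySem.Set.add s w else s) s0 := fun s0 =>
    pvEnumFold (fun w s => if ¬ (PySem.Str.isIn (String.ofList [pvLetter k]) w = true) then PySem.Set.add s w else s) final s0 0
  rw [this, pvPerIndex final k hk]
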